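-- pv_equiv track=rewrite | github.com/Yadkee/ProjectEuler | problems[051-075]/problem058.py | sixn
-- ===== SOURCE A (Python) =====
-- from itertools import count
--
-- def sixn(m):
--     """All primes are of the form 6n + 1 or 6n - 1"""
--     if 3 >= m:
--         return
--     yield 2
--     if 3 >= m:
--         return
--     yield 3
--     for i in count(1):
--         x = 6 * i + 1
--         if x - 2 >= m:
--             break
--         yield x - 2
--         if x >= m:
--             break
--         yield x
-- ===== SOURCE B (Python) =====
-- def sixn(m):
--     """All primes are of the form 6n + 1 or 6n - 1"""
--     if m <= 3:
--         return
--     yield 2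
--     yield 3
--     n = 5
--     while n < m:
--         if n % 6 == 1 or n % 6 == 5:
--             yield n
--         n += 1
-- ===== Notes on version B (the rewrite author's own statement) =====
-- stated objective: alternative
-- what changed: B enumerates every integer from 5 up to m with a while loop and filters by n % 6 in {1,5}, instead of directly generating 6i-1/6i+1 pairs with interleaved break checks.
import Mathlib
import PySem

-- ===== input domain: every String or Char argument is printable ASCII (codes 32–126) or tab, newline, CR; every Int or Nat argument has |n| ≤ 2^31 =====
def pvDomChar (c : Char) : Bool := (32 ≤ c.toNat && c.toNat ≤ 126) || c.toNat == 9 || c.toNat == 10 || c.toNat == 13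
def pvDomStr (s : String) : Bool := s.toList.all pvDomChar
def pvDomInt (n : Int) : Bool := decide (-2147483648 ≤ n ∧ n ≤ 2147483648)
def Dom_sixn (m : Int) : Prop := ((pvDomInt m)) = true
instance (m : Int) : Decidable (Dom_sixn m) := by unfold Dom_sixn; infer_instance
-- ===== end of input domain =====

-- B enumerates all integers from 5 and filters by n % 6 ∈ {1,5}; A generates 6i±1 directly. Same values, alternative traversal.

-- termination measures (named lemmas so the WF proofs stay small; cited by the ports' decreasing_by)
theorem pvDecrSix (m i : Int) (h : 6 * i + 1 < m) :
    (m - (6 * (i + 1) - 1)).toNat < (m - (6 * i - 1)).toNat := by omega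

theorem pvDecrStep (m n : Int) (h : n < m) :
    (m - (n + 1)).toNat < (m - n).toNat := by omega

-- ===== PORT A =====
-- the counting loop: for i in count(1): x = 6*i+1; break/yield as in A
def sixnLoop (m : Int) (i : Int) : List Int :=
  let x := 6 * i + 1
  if x - 2 ≥ m then []
  else (x - 2) :: (if x ≥ m then [] else x :: sixnLoop m (i + 1))
termination_by (m - (6 * i - 1)).toNat
decreasing_by exact pvDecrSix m i (by omega)

def sixn (m : Int) : List Int :=
  if 3 ≥ m then []
  else 2 :: (if 3 ≥ m then [] else 3 :: sixnLoop m 1)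

-- ===== PORT B =====
-- the while loop: while n < m: if n % 6 in (1,5): yield n; n += 1
def sixnAltLoop (m : Int) (n : Int) : List Int :=
  if n < m then
    (if n % 6 = 1 ∨ n % 6 = 5 then n :: sixnAltLoop m (n + 1) else sixnAltLoop m (n + 1))
  else []
termination_by (m - n).toNat
decreasing_by all_goals exact pvDecrStep m n (by omega)

def sixn_alt (m : Int) : List Int :=
  if m ≤ 3 then []
  else 2 :: 3 :: sixnAltLoop m 5

-- ===== PRECONDITION & SPEC =====
def Spec_sixn (m : Int) (out : List Int) : Prop := out = sixn_alt m
instance (m : Int) (out : List Int) : Decidable (Spec_sixn m out) := by unfold Spec_sixn; infer_instance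

-- ===== CLAIM (what is proved, stated in full; the proofs are below) =====
def Claim_equal_sixn : Prop := ∀ (m : Int), Dom_sixn m → Spec_sixn m (sixn m)

-- ===== LEMMAS AND PROOFS =====

-- a non-yielding step of B's loop can be skipped
lemma altLoop_skip (m n : Int) (h : ¬ (n % 6 = 1 ∨ n % 6 = 5)) :
    sixnAltLoop m n = sixnAltLoop m (n + 1) := by
  rw [sixnAltLoop]
  by_cases hlt : n < m
  · simp [hlt, h]
  · rw [sixnAltLoop]
    simp [hlt]
    intro h'
    omega

lemma loop_eq_aux (m : Int) : ∀ k : Nat, ∀ i : Int, (m - (6 * i - 1)).toNat ≤ k →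
    sixnLoop m i = sixnAltLoop m (6 * i - 1) := by
  intro k
  induction k with
  | zero =>
    intro i hk
    rw [sixnLoop, sixnAltLoop]
    have h1 : 6 * i + 1 - 2 ≥ m := by omega
    have h2 : ¬ (6 * i - 1 < m) := by omega
    simp [h1, h2]
  | succ k ih =>
    intro i hk
    rw [sixnLoop]
    by_cases h1 : 6 * i + 1 - 2 ≥ m
    · rw [sixnAltLoop]
      have h2 : ¬ (6 * i - 1 < m) := by omega
      simp [h1, h2]
    · -- 6i-1 < m : B yields 6i-1
      have hm5 : (6 * i - 1) % 6 = 5 := by omega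
      have hlt : 6 * i - 1 < m := by omega
      rw [sixnAltLoop, if_pos hlt, if_pos (Or.inr hm5), if_neg h1,
        show (6 : Int) * i + 1 - 2 = 6 * i - 1 by ring]
      congr 1
      by_cases h2 : 6 * i + 1 ≥ m
      · -- A stops after yielding 6i-1; B skips 6i then stops at 6i+1 (or stops at 6i)
        rw [if_pos h2]
        have hs : ¬ ((6 * i) % 6 = 1 ∨ (6 * i) % 6 = 5) := by omega
        have : sixnAltLoop m (6 * i) = sixnAltLoop m (6 * i + 1) := by
          have := altLoop_skip m (6 * i) hs
          simpa using this
        rw [show (6 : Int) * i - 1 + 1 = 6 * i by ring, this]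
        rw [sixnAltLoop]
        have : ¬ (6 * i + 1 < m) := by omega
        simp [this]
      · -- both yield 6i+1 and continue
        rw [if_neg h2]
        have hs0 : ¬ ((6 * i) % 6 = 1 ∨ (6 * i) % 6 = 5) := by omega
        have e0 : sixnAltLoop m (6 * i - 1 + 1) = sixnAltLoop m (6 * i + 1) := by
          rw [show (6 : Int) * i - 1 + 1 = 6 * i by ring]
          have := altLoop_skip m (6 * i) hs0
          simpa using this
        rw [e0, sixnAltLoop]
        have hlt1 : 6 * i + 1 < m := by omega
        have hm1 : (6 * i + 1) % 6 = 1 := by omega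
        simp only [hlt1, if_true, hm1, true_or, if_pos]
        congr 1
        have hs2 : ¬ ((6 * i + 2) % 6 = 1 ∨ (6 * i + 2) % 6 = 5) := by omega
        have hs3 : ¬ ((6 * i + 3) % 6 = 1 ∨ (6 * i + 3) % 6 = 5) := by omega
        have hs4 : ¬ ((6 * i + 4) % 6 = 1 ∨ (6 * i + 4) % 6 = 5) := by omega
        have e2 := altLoop_skip m (6 * i + 2) hs2
        have e3 := altLoop_skip m (6 * i + 3) hs3
        have e4 := altLoop_skip m (6 * i + 4) hs4
        have ihi : sixnLoop m (i + 1) = sixnAltLoop m (6 * (i + 1) - 1) := by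
          apply ih
          omega
        rw [show (6 : Int) * i + 1 + 1 = 6 * i + 2 by ring, e2,
          show (6 : Int) * i + 2 + 1 = 6 * i + 3 by ring, e3,
          show (6 : Int) * i + 3 + 1 = 6 * i + 4 by ring, e4,
          show (6 : Int) * i + 4 + 1 = 6 * (i + 1) - 1 by ring, ihi]

lemma loop_eq (m i : Int) : sixnLoop m i = sixnAltLoop m (6 * i - 1) :=
  loop_eq_aux m (m - (6 * i - 1)).toNat i (le_refl _)

-- ===== VERDICT (by name: the statement is the Claim_ definition above) =====
theorem sixn_spec : Claim_equal_sixn := by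
  intro m _
  unfold Spec_sixn sixn sixn_alt
  by_cases h : 3 ≥ m
  · simp [h, show m ≤ 3 by omega]
  · have h' : ¬ m ≤ 3 := by omega
    simp only [h, h', if_neg, if_false]
    have := loop_eq m 1
    norm_num at this
    simp [this]
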